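-- pv_equiv track=rewrite | github.com/ragib80/SalesAgent | src/agent/azure_sales_aggregate.py | extract_filter_and_orderby_from_odata
-- ===== SOURCE A (Python) =====
-- def extract_filter_and_orderby_from_odata(odata_query):
--     filter_str = None
--     order_by = None
--     for part in odata_query.split('&'):
--         if part.startswith("$filter="):
--             filter_str = part[len("$filter="):]
--         elif part.startswith("$orderby="):
--             order_by = part[len("$orderby="):]
--     return filter_str, order_by
-- ===== SOURCE B (Python) =====
-- def extract_filter_and_orderby_from_odata(odata_query):
--     params = {}
--     for part in odata_query.split('&'):
--         i = part.find('=')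
--         if i != -1:
--             params[part[:i]] = part[i + 1:]
--     return params.get('$filter'), params.get('$orderby')
-- ===== Notes on version B (the rewrite author's own statement) =====
-- stated objective: idiomatic
-- what changed: B replaces A's per-part branching on two hard-coded prefixes by building a generic key->value parameter table (each part split at its first equals sign, last occurrence wins) and then looking up the filter and orderby keys.
import Mathlib
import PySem

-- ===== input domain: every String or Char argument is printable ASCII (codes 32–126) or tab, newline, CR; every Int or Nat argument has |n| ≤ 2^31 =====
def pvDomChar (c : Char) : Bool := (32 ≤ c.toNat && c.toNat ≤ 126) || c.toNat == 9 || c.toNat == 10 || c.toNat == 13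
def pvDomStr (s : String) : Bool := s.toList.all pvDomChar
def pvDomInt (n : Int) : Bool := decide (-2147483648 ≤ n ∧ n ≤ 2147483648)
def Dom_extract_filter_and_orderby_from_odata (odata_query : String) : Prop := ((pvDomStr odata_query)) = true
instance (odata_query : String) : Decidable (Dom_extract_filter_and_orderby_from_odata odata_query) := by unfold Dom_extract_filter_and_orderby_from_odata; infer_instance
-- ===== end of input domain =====

-- B replaces A's hard-coded prefix tests by building a key->value parameter table
-- (each part split at its first '=', last occurrence wins) and looking up the two keys; objective: idiomatic.


-- ===== PORT A =====
-- loop body of A: if/elif on the two literal prefixes, updating (filter_str, order_by)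
def pvStepA (st : Option String × Option String) (part : String) : Option String × Option String :=
  if PySem.Str.startswith part "$filter=" then
    (some (PySem.Str.slice part (some 8) none), st.2)
  else if PySem.Str.startswith part "$orderby=" then
    (st.1, some (PySem.Str.slice part (some 9) none))
  else st

def extract_filter_and_orderby_from_odata (odata_query : String) : Option String × Option String :=
  ((PySem.Str.split? odata_query "&").getD []).foldl pvStepA (none, none)

-- ===== PORT B =====
-- loop body of B: split the part at its first '=' and store key -> value (last wins)
def pvStepB (d : PySem.Dict String String) (part : String) : PySem.Dict String String :=
  let i := PySem.Str.find part "="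
  if i ≠ -1 then
    d.insert (PySem.Str.slice part none (some i)) (PySem.Str.slice part (some (i + 1)) none)
  else d

def extract_filter_and_orderby_from_odata_alt (odata_query : String) : Option String × Option String :=
  let params := ((PySem.Str.split? odata_query "&").getD []).foldl pvStepB PySem.Dict.empty
  (params.get? "$filter", params.get? "$orderby")

-- ===== PRECONDITION & SPEC =====
def Spec_extract_filter_and_orderby_from_odata (odata_query : String) (out : Option String × Option String) : Prop := out = extract_filter_and_orderby_from_odata_alt odata_query
instance (odata_query : String) (out : Option String × Option String) : Decidable (Spec_extract_filter_and_orderby_from_odata odata_query out) := by unfold Spec_extract_filter_and_orderby_from_odata; infer_instance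

-- ===== CLAIM (what is proved, stated in full; the proofs are below) =====
def Claim_equal_extract_filter_and_orderby_from_odata : Prop := ∀ (odata_query : String), Dom_extract_filter_and_orderby_from_odata odata_query → Spec_extract_filter_and_orderby_from_odata odata_query (extract_filter_and_orderby_from_odata odata_query)

-- ===== LEMMAS AND PROOFS =====

-- If pre ++ [c] is a prefix of p and c does not occur in pre, the first occurrence of c in p is at index pre.length.
lemma pv_find_eq_of_prefix (p pre : List Char) (c : Char) (hc : c ∉ pre)
    (hpre : (pre ++ [c]) <+: p) : PySem.Chars.find p [c] = (pre.length : Int) := by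
  obtain ⟨t, ht⟩ := hpre
  subst ht
  have hinf : [c] <:+: (pre ++ [c] ++ t) := ⟨pre, t, by simp⟩
  have hnn : 0 ≤ PySem.Chars.find (pre ++ [c] ++ t) [c] :=
    (PySem.Chars.find_nonneg_iff _ _).mpr hinf
  obtain ⟨h1, h2⟩ := PySem.Chars.find_spec hnn
  set i := (PySem.Chars.find (pre ++ [c] ++ t) [c]).toNat with hi
  have hge : pre.length ≤ i := by
    by_contra h
    push Not at h
    obtain ⟨u, hu⟩ := h1
    have hh : ((pre ++ [c] ++ t).drop i).head? = some c := by
      rw [← hu]; simp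
    rw [List.head?_drop] at hh
    rw [List.append_assoc, List.getElem?_append_left h] at hh
    exact hc (List.mem_of_getElem? hh)
  have hle : i ≤ pre.length := by
    by_contra h
    push Not at h
    exact h2 pre.length h ⟨t, by simp⟩
  have : i = pre.length := le_antisymm hle hge
  omega

-- If p does not start with pre ++ [c] but the first c of p is at index i, then p[:i] ≠ pre.
lemma pv_take_ne (p pre : List Char) (c : Char)
    (hsw : PySem.Chars.startswith p (pre ++ [c]) = false)
    (hnn : 0 ≤ PySem.Chars.find p [c]) :
    p.take (PySem.Chars.find p [c]).toNat ≠ pre := by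
  intro heq
  obtain ⟨h1, _⟩ := PySem.Chars.find_spec hnn
  obtain ⟨u, hu⟩ := h1
  have hp : pre ++ [c] ++ u = p := by
    calc pre ++ [c] ++ u = p.take (PySem.Chars.find p [c]).toNat ++ ([c] ++ u) := by
          rw [heq]; simp
      _ = p := by rw [hu]; exact List.take_append_drop _ _
  rw [(PySem.Chars.startswith_iff p (pre ++ [c])).mpr ⟨u, hp⟩] at hsw
  exact Bool.true_eq_false.mp hsw

-- B's stored key p[:n] is the literal prefix when p starts with pre ++ '='.
lemma pv_key_eq (p : String) (pre : String) (n : Nat) (hn : pre.toList.length = n)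
    (hpre : (pre.toList ++ ['=']) <+: p.toList) :
    PySem.Str.slice p none (some (n : Int)) = pre := by
  apply String.toList_injective
  rw [PySem.Str.toList_slice, PySem.Chars.slice_eq_listSlice,
    PySem.List.slice_to _ (by positivity)]
  obtain ⟨t, ht⟩ := hpre
  rw [← ht, List.append_assoc]
  simpa using List.take_left' hn

-- one step of A equals one dict step of B, viewed through the two lookups
lemma pv_step (d : PySem.Dict String String) (p : String) :
    pvStepA (d.get? "$filter", d.get? "$orderby") p
      = ((pvStepB d p).get? "$filter", (pvStepB d p).get? "$orderby") := by
  by_cases hF : PySem.Str.startswith p "$filter=" = true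
  · have hpre : ("$filter".toList ++ ['=']) <+: p.toList := by
      have := (PySem.Chars.startswith_iff p.toList "$filter=".toList).mp
        (by simpa [PySem.Str.startswith_eq] using hF)
      simpa using this
    have hfind : PySem.Str.find p "=" = 7 := by
      rw [PySem.Str.find_eq]
      simpa using pv_find_eq_of_prefix p.toList "$filter".toList '=' (by decide) hpre
    have hkey : PySem.Str.slice p none (some 7) = "$filter" :=
      pv_key_eq p "$filter" 7 (by decide) hpre
    simp only [pvStepA, pvStepB, hfind, hkey, if_pos hF]
    norm_num
    rw [PySem.Dict.get?_insert_of_ne _ _ (by decide)]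
  · by_cases hO : PySem.Str.startswith p "$orderby=" = true
    · have hpre : ("$orderby".toList ++ ['=']) <+: p.toList := by
        have := (PySem.Chars.startswith_iff p.toList "$orderby=".toList).mp
          (by simpa [PySem.Str.startswith_eq] using hO)
        simpa using this
      have hfind : PySem.Str.find p "=" = 8 := by
        rw [PySem.Str.find_eq]
        simpa using pv_find_eq_of_prefix p.toList "$orderby".toList '=' (by decide) hpre
      have hkey : PySem.Str.slice p none (some 8) = "$orderby" :=
        pv_key_eq p "$orderby" 8 (by decide) hpre
      simp only [pvStepA, pvStepB, hfind, hkey, if_neg hF, if_pos hO]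
      norm_num
      rw [PySem.Dict.get?_insert_of_ne _ _ (by decide)]
    · by_cases hi : PySem.Str.find p "=" = -1
      · simp only [pvStepA, pvStepB, hi, if_neg hF, if_neg hO]
        norm_num
      · have hnn : 0 ≤ PySem.Str.find p "=" := by
          have := PySem.Chars.neg_one_le_find p.toList "=".toList
          rw [PySem.Str.find_eq] at hi ⊢; omega
        have hkeyL : (PySem.Str.slice p none (some (PySem.Str.find p "="))).toList
            = p.toList.take (PySem.Chars.find p.toList ['=']).toNat := by
          rw [PySem.Str.toList_slice, PySem.Chars.slice_eq_listSlice,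
            PySem.List.slice_to _ hnn, PySem.Str.find_eq]
          simp
        have hnn' : 0 ≤ PySem.Chars.find p.toList ['='] := by
          rw [PySem.Str.find_eq] at hnn; simpa using hnn
        have h1 : PySem.Str.slice p none (some (PySem.Str.find p "=")) ≠ "$filter" := by
          intro h
          apply pv_take_ne p.toList "$filter".toList '='
            (by simpa [PySem.Str.startswith_eq] using (Bool.eq_false_iff.mpr hF)) hnn'
          rw [← hkeyL, h]
        have h2 : PySem.Str.slice p none (some (PySem.Str.find p "=")) ≠ "$orderby" := by
          intro h
          apply pv_take_ne p.toList "$orderby".toList '='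
            (by simpa [PySem.Str.startswith_eq] using (Bool.eq_false_iff.mpr hO)) hnn'
          rw [← hkeyL, h]
        simp only [pvStepA, pvStepB, ne_eq, hi, not_false_iff, if_true, if_neg hF, if_neg hO]
        rw [PySem.Dict.get?_insert_of_ne _ _ (Ne.symm h1),
          PySem.Dict.get?_insert_of_ne _ _ (Ne.symm h2)]

-- the loop invariant: A's pair state is B's dict viewed through the two lookups
lemma pv_inv (parts : List String) (d : PySem.Dict String String) :
    parts.foldl pvStepA (d.get? "$filter", d.get? "$orderby")
      = ((parts.foldl pvStepB d).get? "$filter", (parts.foldl pvStepB d).get? "$orderby") := by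
  induction parts generalizing d with
  | nil => rfl
  | cons p ps ih =>
      simp only [List.foldl_cons, pv_step d p]
      exact ih (pvStepB d p)

-- ===== VERDICT (by name: the statement is the Claim_ definition above) =====
theorem extract_filter_and_orderby_from_odata_spec : Claim_equal_extract_filter_and_orderby_from_odata := by
  intro q _
  unfold Spec_extract_filter_and_orderby_from_odata extract_filter_and_orderby_from_odata
    extract_filter_and_orderby_from_odata_alt
  have h := pv_inv ((PySem.Str.split? q "&").getD []) PySem.Dict.empty
  simpa using h
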